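-- pv_equiv track=rewrite | github.com/msbizrise-arch/PW-Extractors | Extractor/modules/mspw.py | _convert_to_cdn_link
-- ===== SOURCE A (Python) =====
-- def _convert_to_cdn_link(url):
--     """Convert PW video URL to CDN encrypted link."""
--     if not url:
--         return url
--
--     cdn_replacements = {
--         "d1d34p8vz63oiq.cloudfront.net": "d26g5bnklkwsh4.cloudfront.net",
--         "d2bps9p1kber4v.cloudfront.net": "d26g5bnklkwsh4.cloudfront.net",
--         "d3cvwyf9ksu0h5.cloudfront.net": "d26g5bnklkwsh4.cloudfront.net",
--         "d1kwv1j9v54g2g.cloudfront.net": "d26g5bnklkwsh4.cloudfront.net",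
--     }
--
--     for old_domain, new_domain in cdn_replacements.items():
--         url = url.replace(old_domain, new_domain)
--
--     return url.strip()
-- ===== SOURCE B (Python) =====
-- def _convert_to_cdn_link(url):
--     """Convert PW video URL to CDN encrypted link (single left-to-right scan)."""
--     if not url:
--         return url
--
--     new_domain = "d26g5bnklkwsh4.cloudfront.net"
--     old_domains = (
--         "d1d34p8vz63oiq.cloudfront.net",
--         "d2bps9p1kber4v.cloudfront.net",
--         "d3cvwyf9ksu0h5.cloudfront.net",
--         "d1kwv1j9v54g2g.cloudfront.net",
--     )
--
--     pieces = []
--     i = 0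
--     n = len(url)
--     while i < n:
--         for old in old_domains:
--             if url.startswith(old, i):
--                 pieces.append(new_domain)
--                 i += len(old)
--                 break
--         else:
--             pieces.append(url[i])
--             i += 1
--     return "".join(pieces).strip()
-- ===== Notes on version B (the rewrite author's own statement) =====
-- stated objective: alternative
-- what changed: Replaces the four sequential whole-string str.replace passes with a single left-to-right scan that tries each old domain at every position and emits the new domain (or the current character) once, then strips.
import Mathlib
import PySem

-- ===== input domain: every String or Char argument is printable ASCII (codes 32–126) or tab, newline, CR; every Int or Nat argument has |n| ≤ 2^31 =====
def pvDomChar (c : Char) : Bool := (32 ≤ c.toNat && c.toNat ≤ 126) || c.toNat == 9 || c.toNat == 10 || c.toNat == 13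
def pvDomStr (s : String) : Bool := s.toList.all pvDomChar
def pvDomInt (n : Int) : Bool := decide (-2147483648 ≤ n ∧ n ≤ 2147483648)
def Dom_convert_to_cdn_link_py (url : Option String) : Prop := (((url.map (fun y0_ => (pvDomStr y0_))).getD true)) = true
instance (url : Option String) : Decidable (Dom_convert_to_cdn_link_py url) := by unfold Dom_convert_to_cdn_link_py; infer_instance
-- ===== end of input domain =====

-- B replaces A's four sequential whole-string replace passes with ONE left-to-right scan that
-- tries the four old domains at each position (objective: alternative; return values proved equal).

-- ===== PORT A =====
def convert_to_cdn_link_py (url : Option String) : Option String :=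
  match url with
  | none => none
  | some u =>
    if u = "" then some u                -- 'if not url: return url' (None is handled by the match)
    else
      -- the four replace passes, in dict insertion order
      let u1 := PySem.Str.replace u "d1d34p8vz63oiq.cloudfront.net" "d26g5bnklkwsh4.cloudfront.net"
      let u2 := PySem.Str.replace u1 "d2bps9p1kber4v.cloudfront.net" "d26g5bnklkwsh4.cloudfront.net"
      let u3 := PySem.Str.replace u2 "d3cvwyf9ksu0h5.cloudfront.net" "d26g5bnklkwsh4.cloudfront.net"
      let u4 := PySem.Str.replace u3 "d1kwv1j9v54g2g.cloudfront.net" "d26g5bnklkwsh4.cloudfront.net"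
      some (PySem.Str.strip u4)

-- ===== PORT B =====
def pvD1 : List Char := "d1d34p8vz63oiq.cloudfront.net".toList
def pvD2 : List Char := "d2bps9p1kber4v.cloudfront.net".toList
def pvD3 : List Char := "d3cvwyf9ksu0h5.cloudfront.net".toList
def pvD4 : List Char := "d1kwv1j9v54g2g.cloudfront.net".toList
def pvT : List Char := "d26g5bnklkwsh4.cloudfront.net".toList

-- Source B's while loop: at each position try the four old domains in order; on a match emit the
-- new domain and skip 29 characters (here: the head plus 28 of the tail), else emit the head
def pvScan (s : List Char) : List Char :=
  match s with
  | [] => []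
  | c :: r =>
    if pvD1.isPrefixOf (c :: r) then pvT ++ pvScan (r.drop 28)
    else if pvD2.isPrefixOf (c :: r) then pvT ++ pvScan (r.drop 28)
    else if pvD3.isPrefixOf (c :: r) then pvT ++ pvScan (r.drop 28)
    else if pvD4.isPrefixOf (c :: r) then pvT ++ pvScan (r.drop 28)
    else c :: pvScan r
termination_by s.length
decreasing_by all_goals (simp [List.length_drop]; try omega)

def convert_to_cdn_link_py_alt (url : Option String) : Option String :=
  match url with
  | none => none
  | some u =>
    if u = "" then some u                -- 'if not url: return url'
    else some (String.ofList (PySem.Chars.strip (pvScan u.toList)))   -- ''.join(pieces).strip()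

-- ===== PRECONDITION & SPEC =====
def Spec_convert_to_cdn_link_py (url : Option String) (out : Option String) : Prop := out = convert_to_cdn_link_py_alt url
instance (url : Option String) (out : Option String) : Decidable (Spec_convert_to_cdn_link_py url out) := by unfold Spec_convert_to_cdn_link_py; infer_instance

-- ===== CLAIM (what is proved, stated in full; the proofs are below) =====
def Claim_equal_convert_to_cdn_link_py : Prop := ∀ (url : Option String), Dom_convert_to_cdn_link_py url → Spec_convert_to_cdn_link_py url (convert_to_cdn_link_py url)

-- ===== LEMMAS AND PROOFS =====

def pvR1 (old new : List Char) (s : List Char) : List Char :=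
  match s with
  | [] => []
  | c :: r =>
    if old.isPrefixOf (c :: r) then new ++ pvR1 old new (r.drop (old.length - 1))
    else c :: pvR1 old new r
termination_by s.length
decreasing_by all_goals (simp [List.length_drop]; try omega)

lemma pvGo_eq (old new : List Char) (hold : old ≠ []) :
    ∀ (fuel : Nat) (l acc : List Char), l.length ≤ fuel →
      PySem.Chars.replace.go old new fuel l acc = acc.reverse ++ pvR1 old new l := by
  intro fuel
  induction fuel with
  | zero =>
    intro l acc hl
    have : l = [] := by cases l <;> simp_all
    subst this
    rw [PySem.Chars.replace.go, pvR1]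
  | succ n ih =>
    intro l acc hl
    cases l with
    | nil => rw [PySem.Chars.replace.go, pvR1]; all_goals simp
    | cons c t =>
      rw [PySem.Chars.replace.go, pvR1]
      by_cases hp : old.isPrefixOf (c :: t)
      · simp only [hp, if_true]
        obtain ⟨o, ot, rfl⟩ : ∃ o ot, old = o :: ot := by
          cases old with | nil => exact absurd rfl hold | cons o ot => exact ⟨o, ot, rfl⟩
        simp only [List.length_cons, Nat.add_sub_cancel, List.drop_succ_cons]
        have h' := ih (List.drop ot.length t) (new.reverse ++ acc)
          (by simp [List.length_drop] at hl ⊢; omega)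
        rw [h']; simp
      · simp only [hp]
        have h' := ih t (c :: acc) (by simp at hl; omega)
        rw [h']; simp
lemma pvReplace_eq (old new s : List Char) (hold : old ≠ []) :
    PySem.Chars.replace s old new = pvR1 old new s := by
  rw [PySem.Chars.replace]
  simp [List.isEmpty_iff, hold]
  rw [pvGo_eq old new hold s.length s [] le_rfl]
  simp

lemma pvPrefix_take_eq {a b c : List Char} (h : a <+: b ++ c) (hl : b.length ≤ a.length) :
    a.take b.length = b := by
  rw [List.prefix_iff_eq_take] at h
  rw [h, List.take_take, min_eq_left hl, List.take_append, Nat.sub_self]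
  simp

lemma pvPrefix_of_append_left {d A B : List Char} (h : d <+: A ++ B) (hl : d.length ≤ A.length) :
    d <+: A := by
  obtain ⟨w, hw⟩ := h
  have h2 : (d ++ w).take d.length = (A ++ B).take d.length := by rw [hw]
  rw [List.take_append, List.take_append, Nat.sub_self, Nat.sub_eq_zero_of_le hl] at h2
  simp at h2
  exact List.prefix_iff_eq_take.mpr h2

lemma pvDrop_prefix {d A B : List Char} (h : d <+: A ++ B) (hl : A.length ≤ d.length) :
    d.drop A.length <+: B := by
  obtain ⟨w, hw⟩ := h
  have h2 : (d ++ w).drop A.length = (A ++ B).drop A.length := by rw [hw]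
  rw [List.drop_append, List.drop_left] at h2
  have : A.length - d.length = 0 := by omega
  simp [this] at h2
  exact ⟨w, h2⟩

lemma pvR1_cons (old new : List Char) (c : Char) (r : List Char) (h : ¬ old <+: (c :: r)) :
    pvR1 old new (c :: r) = c :: pvR1 old new r := by
  rw [pvR1]
  simp only [List.isPrefixOf_iff_prefix, h, if_false]

lemma pvR1_copy (old new : List Char) :
    ∀ (pre X : List Char), (∀ k < pre.length, ¬ old <+: (pre.drop k ++ X)) →
      pvR1 old new (pre ++ X) = pre ++ pvR1 old new X := by
  intro pre
  induction pre with
  | nil => intro X _; simp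
  | cons c p ih =>
    intro X h
    rw [List.cons_append, pvR1_cons old new c (p ++ X) (by simpa using h 0 (by simp))]
    rw [ih X (fun k hk => by simpa using h (k + 1) (by simp; omega))]
    simp

lemma pvR1_match (old new X : List Char) (hold : old ≠ []) :
    pvR1 old new (old ++ X) = new ++ pvR1 old new X := by
  obtain ⟨o, ot, rfl⟩ : ∃ o ot, old = o :: ot := by
    cases old with | nil => exact absurd rfl hold | cons o ot => exact ⟨o, ot, rfl⟩
  rw [List.cons_append, pvR1]
  have hp : (o :: ot).isPrefixOf (o :: (ot ++ X)) = true := by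
    rw [List.isPrefixOf_iff_prefix]
    exact ⟨X, by simp⟩
  simp only [hp, if_true, List.length_cons, Nat.add_sub_cancel, List.drop_left]

lemma pvR1_nomatch_all (old new : List Char) :
    ∀ (s : List Char), (∀ k, ¬ old <+: s.drop k) → pvR1 old new s = s := by
  intro s
  induction s with
  | nil => intro _; rw [pvR1]
  | cons c r ih =>
    intro h
    rw [pvR1_cons old new c r (by simpa using h 0)]
    rw [ih (fun k => by simpa using h (k + 1))]

lemma pvR1_first (old new : List Char) (hold : old ≠ []) :
    ∀ (j : Nat) (s : List Char), (∀ k < j, ¬ old <+: s.drop k) → old <+: s.drop j →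
      pvR1 old new s = s.take j ++ new ++ pvR1 old new (s.drop (j + old.length)) := by
  intro j
  induction j with
  | zero =>
    intro s _ hj
    simp only [List.drop_zero] at hj
    obtain ⟨X, rfl⟩ := hj
    rw [pvR1_match old new X hold]
    simp
  | succ n ih =>
    intro s hk hj
    cases s with
    | nil =>
      simp at hj
      exact absurd hj hold
    | cons c r =>
      rw [pvR1_cons old new c r (by simpa using hk 0 (by omega))]
      rw [ih r (fun k hks => by simpa using hk (k + 1) (by omega)) (by simpa using hj)]
      simp only [List.take_succ_cons, List.cons_append]
      have : n + 1 + old.length = (n + old.length) + 1 := by omega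
      rw [this, List.drop_succ_cons]

lemma pvNoPre (old pre : List Char) (X : List Char) (hlen : pre.length ≤ old.length)
    (h : ∀ k < pre.length, old.take (pre.length - k) ≠ pre.drop k) :
    ∀ k < pre.length, ¬ old <+: (pre.drop k ++ X) := by
  intro k hk hp
  have h2 := pvPrefix_take_eq hp (by simp [List.length_drop]; omega)
  rw [List.length_drop] at h2
  exact h k hk h2

lemma pvTNP : ∀ d ∈ [pvD1, pvD2, pvD3, pvD4], ∀ f < 29, 0 < f → d.drop f ≠ pvT.take (29 - f) := by decide

lemma pvNSS : ∀ old ∈ [pvD1, pvD2, pvD3, pvD4], ∀ pre ∈ [pvD1, pvD2, pvD3, pvD4, pvT], old ≠ pre →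
    ∀ k < 29, old.take (29 - k) ≠ pre.drop k := by decide

lemma pvHeads (old d s : List Char) (hol : old.length = 29) (hdl : d.length = 29)
    (hno : ∀ f < 29, 0 < f → d.drop f ≠ pvT.take (29 - f))
    (h1 : ¬ old <+: s) (h2 : ¬ d <+: s) : ¬ d <+: pvR1 old pvT s := by
  have hold : old ≠ [] := by intro h; rw [h] at hol; simp at hol
  by_cases hex : ∃ k, old <+: s.drop k
  · have hjm := Nat.find_spec hex
    have hmin := fun k (hk : k < Nat.find hex) => Nat.find_min hex hk
    set j := Nat.find hex with hjdef
    have hj0 : j ≠ 0 := by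
      intro h
      rw [h, List.drop_zero] at hjm
      exact h1 hjm
    have hjs : j + 29 ≤ s.length := by
      have := hjm.length_le
      rw [List.length_drop, hol] at this
      by_cases hjl : j ≤ s.length
      · omega
      · rw [List.drop_eq_nil_of_le (by omega)] at hjm
        simp at hjm
        exact absurd hjm hold
    rw [pvR1_first old pvT hold j s hmin hjm]
    intro hd
    have hlt : (s.take j).length = j := by simp; omega
    rw [List.append_assoc] at hd
    by_cases hj29 : 29 ≤ j
    · have hpre : d <+: s.take j := pvPrefix_of_append_left hd (by omega)
      exact h2 (hpre.trans (List.take_prefix j s))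
    · have ht : d.take j = s.take j := by
        have := pvPrefix_take_eq hd (by omega)
        rwa [hlt] at this
      have hdr : d.drop j <+: pvT ++ pvR1 old pvT (s.drop (j + old.length)) := by
        have := pvDrop_prefix hd (by omega)
        rwa [hlt] at this
      have hpt : d.drop j <+: pvT := pvPrefix_of_append_left hdr (by simp [hdl, pvT])
      have : d.drop j = pvT.take (29 - j) := by
        have := List.prefix_iff_eq_take.mp hpt
        rwa [List.length_drop, hdl] at this
      exact hno j (by omega) (by omega) this
  · push Not at hex
    rw [pvR1_nomatch_all old pvT s hex]
    exact h2

lemma pvTail_drop (d X : List Char) (c : Char) (r : List Char) (hd : d.length = 29)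
    (hs : d ++ X = c :: r) : r.drop 28 = X := by
  have : r = d.tail ++ X := by
    have := congrArg List.tail hs
    cases d with
    | nil => simp at hd
    | cons a b => simpa using this.symm
  rw [this, List.drop_left' (by cases d <;> simp_all)]

lemma pvScan_d1 (X : List Char) : pvScan (pvD1 ++ X) = pvT ++ pvScan X := by
  cases hs : pvD1 ++ X with
  | nil => exact absurd hs (by simp [pvD1])
  | cons c r =>
    rw [pvScan]
    have hp : pvD1.isPrefixOf (c :: r) = true := List.isPrefixOf_iff_prefix.mpr ⟨X, hs⟩
    simp only [hp, if_true]
    rw [pvTail_drop pvD1 X c r (by decide) hs]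

lemma pvScan_d2 (X : List Char) (h1 : ¬ pvD1 <+: pvD2 ++ X) :
    pvScan (pvD2 ++ X) = pvT ++ pvScan X := by
  cases hs : pvD2 ++ X with
  | nil => exact absurd hs (by simp [pvD2])
  | cons c r =>
    rw [hs] at h1
    rw [pvScan]
    have hp : pvD2.isPrefixOf (c :: r) = true := List.isPrefixOf_iff_prefix.mpr ⟨X, hs⟩
    simp only [List.isPrefixOf_iff_prefix, h1, if_false, hp, if_true]
    rw [pvTail_drop pvD2 X c r (by decide) hs]

lemma pvScan_d3 (X : List Char) (h1 : ¬ pvD1 <+: pvD3 ++ X) (h2 : ¬ pvD2 <+: pvD3 ++ X) :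
    pvScan (pvD3 ++ X) = pvT ++ pvScan X := by
  cases hs : pvD3 ++ X with
  | nil => exact absurd hs (by simp [pvD3])
  | cons c r =>
    rw [hs] at h1 h2
    rw [pvScan]
    have hp : pvD3.isPrefixOf (c :: r) = true := List.isPrefixOf_iff_prefix.mpr ⟨X, hs⟩
    simp only [List.isPrefixOf_iff_prefix, h1, h2, if_false, hp, if_true]
    rw [pvTail_drop pvD3 X c r (by decide) hs]

lemma pvScan_d4 (X : List Char) (h1 : ¬ pvD1 <+: pvD4 ++ X) (h2 : ¬ pvD2 <+: pvD4 ++ X)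
    (h3 : ¬ pvD3 <+: pvD4 ++ X) : pvScan (pvD4 ++ X) = pvT ++ pvScan X := by
  cases hs : pvD4 ++ X with
  | nil => exact absurd hs (by simp [pvD4])
  | cons c r =>
    rw [hs] at h1 h2 h3
    rw [pvScan]
    have hp : pvD4.isPrefixOf (c :: r) = true := List.isPrefixOf_iff_prefix.mpr ⟨X, hs⟩
    simp only [List.isPrefixOf_iff_prefix, h1, h2, h3, if_false, hp, if_true]
    rw [pvTail_drop pvD4 X c r (by decide) hs]

lemma pvScan_cons (c : Char) (r : List Char) (h1 : ¬ pvD1 <+: c :: r) (h2 : ¬ pvD2 <+: c :: r)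
    (h3 : ¬ pvD3 <+: c :: r) (h4 : ¬ pvD4 <+: c :: r) : pvScan (c :: r) = c :: pvScan r := by
  rw [pvScan]
  simp only [List.isPrefixOf_iff_prefix, h1, h2, h3, h4, if_false]

lemma pvCond (old pre : List Char) (X : List Char) (hol : old.length = 29) (hpl : pre.length = 29)
    (hne : ∀ k < 29, old.take (29 - k) ≠ pre.drop k) :
    ∀ k < pre.length, ¬ old <+: (pre.drop k ++ X) :=
  pvNoPre old pre X (by omega) (by rw [hpl]; exact hne)

lemma pvMain : ∀ (s : List Char),
    pvR1 pvD4 pvT (pvR1 pvD3 pvT (pvR1 pvD2 pvT (pvR1 pvD1 pvT s))) = pvScan s := by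
  suffices H : ∀ (n : Nat) (s : List Char), s.length ≤ n →
      pvR1 pvD4 pvT (pvR1 pvD3 pvT (pvR1 pvD2 pvT (pvR1 pvD1 pvT s))) = pvScan s from
    fun s => H s.length s le_rfl
  intro n
  induction n with
  | zero =>
    intro s hs
    have : s = [] := by cases s <;> simp_all
    subst this
    simp [pvR1, pvScan]
  | succ n ih =>
    intro s hs
    by_cases h1 : pvD1 <+: s
    · obtain ⟨X, hX⟩ := h1
      subst hX
      rw [pvR1_match pvD1 pvT X (by decide)]
      rw [pvR1_copy pvD2 pvT pvT _ (pvCond pvD2 pvT _ (by decide) (by decide)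
        (pvNSS pvD2 (by decide) pvT (by decide) (by decide)))]
      rw [pvR1_copy pvD3 pvT pvT _ (pvCond pvD3 pvT _ (by decide) (by decide)
        (pvNSS pvD3 (by decide) pvT (by decide) (by decide)))]
      rw [pvR1_copy pvD4 pvT pvT _ (pvCond pvD4 pvT _ (by decide) (by decide)
        (pvNSS pvD4 (by decide) pvT (by decide) (by decide)))]
      rw [ih X (by rw [List.length_append, (show pvD1.length = 29 by decide)] at hs; omega)]
      rw [pvScan_d1]
    · by_cases h2 : pvD2 <+: s
      · obtain ⟨X, hX⟩ := h2
        subst hX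
        rw [pvR1_copy pvD1 pvT pvD2 _ (pvCond pvD1 pvD2 _ (by decide) (by decide)
          (pvNSS pvD1 (by decide) pvD2 (by decide) (by decide)))]
        rw [pvR1_match pvD2 pvT _ (by decide)]
        rw [pvR1_copy pvD3 pvT pvT _ (pvCond pvD3 pvT _ (by decide) (by decide)
          (pvNSS pvD3 (by decide) pvT (by decide) (by decide)))]
        rw [pvR1_copy pvD4 pvT pvT _ (pvCond pvD4 pvT _ (by decide) (by decide)
          (pvNSS pvD4 (by decide) pvT (by decide) (by decide)))]
        rw [ih X (by rw [List.length_append, (show pvD2.length = 29 by decide)] at hs; omega)]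
        rw [pvScan_d2 X h1]
      · by_cases h3 : pvD3 <+: s
        · obtain ⟨X, hX⟩ := h3
          subst hX
          rw [pvR1_copy pvD1 pvT pvD3 _ (pvCond pvD1 pvD3 _ (by decide) (by decide)
            (pvNSS pvD1 (by decide) pvD3 (by decide) (by decide)))]
          rw [pvR1_copy pvD2 pvT pvD3 _ (pvCond pvD2 pvD3 _ (by decide) (by decide)
            (pvNSS pvD2 (by decide) pvD3 (by decide) (by decide)))]
          rw [pvR1_match pvD3 pvT _ (by decide)]
          rw [pvR1_copy pvD4 pvT pvT _ (pvCond pvD4 pvT _ (by decide) (by decide)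
            (pvNSS pvD4 (by decide) pvT (by decide) (by decide)))]
          rw [ih X (by rw [List.length_append, (show pvD3.length = 29 by decide)] at hs; omega)]
          rw [pvScan_d3 X h1 h2]
        · by_cases h4 : pvD4 <+: s
          · obtain ⟨X, hX⟩ := h4
            subst hX
            rw [pvR1_copy pvD1 pvT pvD4 _ (pvCond pvD1 pvD4 _ (by decide) (by decide)
              (pvNSS pvD1 (by decide) pvD4 (by decide) (by decide)))]
            rw [pvR1_copy pvD2 pvT pvD4 _ (pvCond pvD2 pvD4 _ (by decide) (by decide)
              (pvNSS pvD2 (by decide) pvD4 (by decide) (by decide)))]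
            rw [pvR1_copy pvD3 pvT pvD4 _ (pvCond pvD3 pvD4 _ (by decide) (by decide)
              (pvNSS pvD3 (by decide) pvD4 (by decide) (by decide)))]
            rw [pvR1_match pvD4 pvT _ (by decide)]
            rw [ih X (by rw [List.length_append, (show pvD4.length = 29 by decide)] at hs; omega)]
            rw [pvScan_d4 X h1 h2 h3]
          · cases s with
            | nil => simp [pvR1, pvScan]
            | cons c r =>
              have e1 : pvR1 pvD1 pvT (c :: r) = c :: pvR1 pvD1 pvT r := pvR1_cons _ _ _ _ h1
              have n2 : ¬ pvD2 <+: pvR1 pvD1 pvT (c :: r) :=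
                pvHeads pvD1 pvD2 (c :: r) (by decide) (by decide) (pvTNP pvD2 (by decide)) h1 h2
              have n3 : ¬ pvD3 <+: pvR1 pvD1 pvT (c :: r) :=
                pvHeads pvD1 pvD3 (c :: r) (by decide) (by decide) (pvTNP pvD3 (by decide)) h1 h3
              have n4 : ¬ pvD4 <+: pvR1 pvD1 pvT (c :: r) :=
                pvHeads pvD1 pvD4 (c :: r) (by decide) (by decide) (pvTNP pvD4 (by decide)) h1 h4
              have n3' : ¬ pvD3 <+: pvR1 pvD2 pvT (pvR1 pvD1 pvT (c :: r)) :=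
                pvHeads pvD2 pvD3 _ (by decide) (by decide) (pvTNP pvD3 (by decide)) n2 n3
              have n4' : ¬ pvD4 <+: pvR1 pvD2 pvT (pvR1 pvD1 pvT (c :: r)) :=
                pvHeads pvD2 pvD4 _ (by decide) (by decide) (pvTNP pvD4 (by decide)) n2 n4
              have n4'' : ¬ pvD4 <+: pvR1 pvD3 pvT (pvR1 pvD2 pvT (pvR1 pvD1 pvT (c :: r))) :=
                pvHeads pvD3 pvD4 _ (by decide) (by decide) (pvTNP pvD4 (by decide)) n3' n4'
              rw [e1] at n2 n3 n4 ⊢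
              have e2 : pvR1 pvD2 pvT (c :: pvR1 pvD1 pvT r) = c :: pvR1 pvD2 pvT (pvR1 pvD1 pvT r) :=
                pvR1_cons _ _ _ _ n2
              rw [e1, e2] at n3' n4'
              rw [e2] at ⊢
              have e3 : pvR1 pvD3 pvT (c :: pvR1 pvD2 pvT (pvR1 pvD1 pvT r)) =
                  c :: pvR1 pvD3 pvT (pvR1 pvD2 pvT (pvR1 pvD1 pvT r)) := pvR1_cons _ _ _ _ n3'
              rw [e1, e2, e3] at n4''
              rw [e3] at ⊢
              have e4 : pvR1 pvD4 pvT (c :: pvR1 pvD3 pvT (pvR1 pvD2 pvT (pvR1 pvD1 pvT r))) =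
                  c :: pvR1 pvD4 pvT (pvR1 pvD3 pvT (pvR1 pvD2 pvT (pvR1 pvD1 pvT r))) :=
                pvR1_cons _ _ _ _ n4''
              rw [e4]
              rw [ih r (by simp at hs; omega)]
              rw [pvScan_cons c r h1 h2 h3 h4]

-- ===== VERDICT (by name: the statement is the Claim_ definition above) =====
theorem convert_to_cdn_link_py_spec : Claim_equal_convert_to_cdn_link_py := by
  intro url _
  unfold Spec_convert_to_cdn_link_py
  cases url with
  | none => rfl
  | some u =>
    simp only [convert_to_cdn_link_py, convert_to_cdn_link_py_alt]
    by_cases hu : u = ""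
    · simp [hu]
    · simp only [hu, if_false]
      refine congrArg some ?_
      rw [PySem.Str.strip]
      apply congrArg String.ofList
      apply congrArg PySem.Chars.strip
      rw [PySem.Str.toList_replace, PySem.Str.toList_replace, PySem.Str.toList_replace,
        PySem.Str.toList_replace]
      rw [pvReplace_eq _ _ _ (by decide), pvReplace_eq _ _ _ (by decide),
        pvReplace_eq _ _ _ (by decide), pvReplace_eq _ _ _ (by decide)]
      exact pvMain u.toList
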